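-- pv_equiv track=rewrite | github.com/Akarsha1607/Akarsha-Davis | NBO_output_extraction_classification_filteration.py | find_bond_path_with_distance
-- ===== SOURCE A (Python) =====
-- from collections import deque
--
-- def find_bond_path_with_distance(connectivity, start_atom, target_atom):
--     queue = deque([(start_atom, [start_atom])])
--     visited = set()
--     while queue:
--         current_atom, path = queue.popleft()
--         if current_atom == target_atom:
--             return len(path) - 1, path  # Return the bond count and path
--         visited.add(current_atom)
--         for neighbor in connectivity.get(current_atom, []):
--             if neighbor not in visited:
--                 queue.append((neighbor, path + [neighbor]))
-- ===== SOURCE B (Python) =====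
-- from collections import deque
--
-- def find_bond_path_with_distance(connectivity, start_atom, target_atom):
--     # Predecessor-map BFS: the queue holds atoms only; each atom is recorded once in a
--     # parent map when discovered, and the path is rebuilt back-to-front at the end,
--     # instead of copying a growing path list into every queue entry as A does.
--     parent = {start_atom: start_atom}
--     queue = deque([start_atom])
--     while queue:
--         u = queue.popleft()
--         if u == target_atom:
--             path = []
--             x = u
--             while parent[x] != x:
--                 path.append(x)
--                 x = parent[x]
--             path.append(x)
--             path.reverse()
--             return len(path) - 1, path
--         for v in connectivity.get(u, []):
--             if v not in parent:
--                 parent[v] = u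
--                 queue.append(v)
-- ===== Notes on version B (the rewrite author's own statement) =====
-- stated objective: alternative
-- what changed: B's queue holds atoms only and records each atom's predecessor once in a parent map, rebuilding the path back-to-front at the end, whereas A copies a full path list into every queue entry and can re-enqueue an atom many times because it marks visited only at dequeue.
import Mathlib
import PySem

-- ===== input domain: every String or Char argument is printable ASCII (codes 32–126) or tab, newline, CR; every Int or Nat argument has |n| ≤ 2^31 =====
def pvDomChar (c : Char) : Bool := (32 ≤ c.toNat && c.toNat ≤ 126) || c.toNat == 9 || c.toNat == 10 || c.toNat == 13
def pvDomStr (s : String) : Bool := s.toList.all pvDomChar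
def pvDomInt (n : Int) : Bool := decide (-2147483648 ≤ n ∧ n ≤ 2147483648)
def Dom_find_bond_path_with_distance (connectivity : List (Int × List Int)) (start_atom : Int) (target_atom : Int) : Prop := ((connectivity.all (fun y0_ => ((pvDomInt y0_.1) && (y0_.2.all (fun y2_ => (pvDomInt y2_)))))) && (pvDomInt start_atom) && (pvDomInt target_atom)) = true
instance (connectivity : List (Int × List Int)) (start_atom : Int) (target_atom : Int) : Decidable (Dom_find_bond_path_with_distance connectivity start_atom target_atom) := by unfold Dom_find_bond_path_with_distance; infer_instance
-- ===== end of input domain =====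

-- B replaces A's queue of (atom, full path copy) — which can also re-enqueue an atom many
-- times since A marks visited only at dequeue — by a queue of atoms plus a predecessor map,
-- rebuilding the path back-to-front only when the target is reached.

-- connectivity.get(u, []) (shared input accessor of both ports)
def pvAdj (c : List (Int × List Int)) (u : Int) : List Int :=
  (PySem.Dict.mk c).getD u []

-- fuel bound for the while loops (a totality guard only; the proofs show it is never
-- exhausted): (max degree + 2) ^ (number of distinct atoms + 1) dominates the queue
-- measures used below.
def pvDeg (c : List (Int × List Int)) : Nat :=
  (c.map (fun kv => kv.2.length)).foldr max 0

def pvNodes (c : List (Int × List Int)) (s : Int) : List Int :=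
  s :: (c.map Prod.fst ++ (c.map Prod.snd).flatten)

def pvFuel (c : List (Int × List Int)) (s : Int) : Nat :=
  (pvDeg c + 2) ^ ((pvNodes c s).dedup.length + 1)

-- ===== PORT A =====
-- A's while loop: pop (atom, path); mark visited at DEQUEUE; enqueue every not-yet-visited
-- neighbor with a fresh path copy (duplicate queue entries are possible).
def pvLoopA (c : List (Int × List Int)) (t : Int) :
    Nat → List (Int × List Int) → PySem.Set Int → Option (Int × List Int)
  | _, [], _ => none
  | 0, _ :: _, _ => none
  | fuel + 1, (u, p) :: rest, visited =>
    if u = t then some ((p.length : Int) - 1, p)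
    else
      let visited' := PySem.Set.add visited u
      pvLoopA c t fuel
        (rest ++ (pvAdj c u).filterMap (fun v =>
          if PySem.Set.contains visited' v then none else some (v, p ++ [v])))
        visited'

def find_bond_path_with_distance (connectivity : List (Int × List Int)) (start_atom : Int) (target_atom : Int) : Option (Int × List Int) :=
  pvLoopA connectivity target_atom (pvFuel connectivity start_atom)
    [(start_atom, [start_atom])] PySem.Set.empty

-- ===== PORT B =====
-- B's inner while: path = []; x = u; while parent[x] != x: path.append(x); x = parent[x];
-- path.append(x); path.reverse().  The 'none' branch (Python's KeyError) is unreachable on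
-- the parent maps the loop builds; the fuel (the map's size) is likewise never exhausted.
def pvBuild (parent : PySem.Dict Int Int) : Nat → Int → List Int → List Int
  | 0, x, path => (path ++ [x]).reverse
  | fuel + 1, x, path =>
    match parent.get? x with
    | some px => if px = x then (path ++ [x]).reverse
                 else pvBuild parent fuel px (path ++ [x])
    | none => (path ++ [x]).reverse

-- B's while loop: pop an atom; neighbors absent from the parent map are recorded with
-- their predecessor and enqueued (each atom enters the queue at most once).
def pvLoopB (c : List (Int × List Int)) (t : Int) :
    Nat → List Int → PySem.Dict Int Int → Option (Int × List Int)
  | _, [], _ => none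
  | 0, _ :: _, _ => none
  | fuel + 1, u :: rest, parent =>
    if u = t then
      let path := pvBuild parent parent.size u []
      some ((path.length : Int) - 1, path)
    else
      let st := (pvAdj c u).foldl
        (fun (st : PySem.Dict Int Int × List Int) v =>
          if st.1.contains v then st else (st.1.insert v u, st.2 ++ [v]))
        (parent, [])
      pvLoopB c t fuel (rest ++ st.2) st.1

def find_bond_path_with_distance_alt (connectivity : List (Int × List Int)) (start_atom : Int) (target_atom : Int) : Option (Int × List Int) :=
  pvLoopB connectivity target_atom (pvFuel connectivity start_atom)
    [start_atom] (PySem.Dict.mk [(start_atom, start_atom)])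

-- ===== PRECONDITION & SPEC =====
def Spec_find_bond_path_with_distance (connectivity : List (Int × List Int)) (start_atom : Int) (target_atom : Int) (out : Option (Int × List Int)) : Prop := out = find_bond_path_with_distance_alt connectivity start_atom target_atom
instance (connectivity : List (Int × List Int)) (start_atom : Int) (target_atom : Int) (out : Option (Int × List Int)) : Decidable (Spec_find_bond_path_with_distance connectivity start_atom target_atom out) := by unfold Spec_find_bond_path_with_distance; infer_instance

-- ===== CLAIM (what is proved, stated in full; the proofs are below) =====
def Claim_equal_find_bond_path_with_distance : Prop := ∀ (connectivity : List (Int × List Int)) (start_atom : Int) (target_atom : Int), Dom_find_bond_path_with_distance connectivity start_atom target_atom → Spec_find_bond_path_with_distance connectivity start_atom target_atom (find_bond_path_with_distance connectivity start_atom target_atom)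

-- ===== LEMMAS AND PROOFS =====

-- Proof plan: an intermediate path-carrying BFS loop pvLoopM (each atom enqueued at most
-- once, full path per entry) is equated with A's loop by the simulation pvMain, and with
-- B's loop by the lockstep simulation pvBC relating path lists to parent-map chains.
def pvLoopM (c : List (Int × List Int)) (t : Int) :
    Nat → List (Int × List Int) → PySem.Set Int → Option (Int × List Int)
  | _, [], _ => none
  | 0, _ :: _, _ => none
  | fuel + 1, (u, p) :: rest, visited =>
    if u = t then some ((p.length : Int) - 1, p)
    else
      let st := (pvAdj c u).foldl
        (fun (st : PySem.Set Int × List (Int × List Int)) v =>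
          if PySem.Set.contains st.1 v then st
          else (PySem.Set.add st.1 v, st.2 ++ [(v, p ++ [v])]))
        (visited, [])
      pvLoopM c t fuel (rest ++ st.2) st.1

-- Projection of A's queue onto M's: keep the first occurrence of each not-yet-visited atom.
def pvProj : List (Int × List Int) → List Int → List (Int × List Int)
  | [], _ => []
  | (u, p) :: rest, seen =>
    if u ∈ seen then pvProj rest seen else (u, p) :: pvProj rest (u :: seen)

-- A's appended batch (membership form of the port's filterMap)
def pvAps (W p : List Int) : List Int → List (Int × List Int)
  | [] => []
  | v :: rest => if v ∈ W then pvAps W p rest else (v, p ++ [v]) :: pvAps W p rest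

-- M's inner fold body (membership form of the lambda)
def pvF (p : List Int) (st : PySem.Set Int × List (Int × List Int)) (v : Int) :
    PySem.Set Int × List (Int × List Int) :=
  if v ∈ st.1 then st else (st.1 ++ [v], st.2 ++ [(v, p ++ [v])])

-- A's termination measure: Σ over queue entries of C^(N+1-|path|), C = pvDeg+2, N = #atoms.
def pvWt (c : List (Int × List Int)) (s : Int) (p : List Int) : Nat :=
  (pvDeg c + 2) ^ ((pvNodes c s).dedup.length + 1 - p.length)

def pvM (c : List (Int × List Int)) (s : Int) (Q : List (Int × List Int)) : Nat :=
  (Q.map (fun e => pvWt c s e.2)).sum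

-- invariant of A's state (queue, visited)
def pvInv (c : List (Int × List Int)) (s t : Int) (Q : List (Int × List Int)) (V : List Int) : Prop :=
  t ∉ V ∧
  (∀ e ∈ Q, e.2 ≠ [] ∧ e.2.Nodup ∧ e.2.getLast? = some e.1 ∧
      (∀ x ∈ e.2, x ∈ pvNodes c s) ∧ (∀ x ∈ e.2.dropLast, x ∈ V)) ∧
  (∀ u ∈ V, ∀ v ∈ pvAdj c u, v ∈ V ∨ v ∈ Q.map Prod.fst)

-- the ports' terms in membership form
lemma pvApsEq (W p ns : List Int) :
    ns.filterMap (fun v =>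
      if PySem.Set.contains W v then none else some (v, p ++ [v])) = pvAps W p ns := by
  induction ns with
  | nil => rfl
  | cons v rest ih =>
    by_cases hv : v ∈ W
    · have hf : (if PySem.Set.contains W v then none else some (v, p ++ [v]))
          = (none : Option (Int × List Int)) := by
        simp [PySem.Set.contains_iff, hv]
      simp only [List.filterMap_cons, hf, ih, pvAps, if_pos hv]
    · have hf : (if PySem.Set.contains W v then none else some (v, p ++ [v]))
          = some (v, p ++ [v]) := by
        simp [PySem.Set.contains_iff, hv]
      simp only [List.filterMap_cons, hf, ih, pvAps, if_neg hv]

lemma pvFoldRw (p : List Int) (ns : List Int) (st0 : PySem.Set Int × List (Int × List Int)) :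
    ns.foldl (fun (st : PySem.Set Int × List (Int × List Int)) v =>
        if PySem.Set.contains st.1 v then st
        else (PySem.Set.add st.1 v, st.2 ++ [(v, p ++ [v])])) st0
      = ns.foldl (pvF p) st0 := by
  have hfun : (fun (st : PySem.Set Int × List (Int × List Int)) v =>
      if PySem.Set.contains st.1 v then st
      else (PySem.Set.add st.1 v, st.2 ++ [(v, p ++ [v])])) = pvF p := by
    funext st v
    by_cases h : v ∈ st.1
    · simp [pvF, PySem.Set.contains_iff, h]
    · simp [pvF, PySem.Set.contains_iff, h, PySem.Set.add_of_not_mem h]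
  rw [hfun]

lemma pvProj_congr {s s' : List Int} (Q : List (Int × List Int))
    (h : ∀ x, x ∈ s ↔ x ∈ s') : pvProj Q s = pvProj Q s' := by
  induction Q generalizing s s' with
  | nil => rfl
  | cons e rest ih =>
    obtain ⟨u, p⟩ := e
    by_cases hu : u ∈ s
    · simp only [pvProj, if_pos hu, if_pos ((h u).mp hu)]
      exact ih h
    · simp only [pvProj, if_neg hu, if_neg (fun hx => hu ((h u).mpr hx))]
      refine congrArg _ (ih ?_)
      intro x; simp only [List.mem_cons]; exact or_congr Iff.rfl (h x)

lemma pvProj_append (Q1 Q2 : List (Int × List Int)) (s : List Int) :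
    pvProj (Q1 ++ Q2) s = pvProj Q1 s ++ pvProj Q2 (Q1.map Prod.fst ++ s) := by
  induction Q1 generalizing s with
  | nil => simp [pvProj]
  | cons e rest ih =>
    obtain ⟨u, p⟩ := e
    by_cases hu : u ∈ s
    · simp only [List.cons_append, pvProj, if_pos hu, ih, List.map_cons]
      refine congrArg _ (pvProj_congr _ ?_)
      intro x
      have hxu : x = u → x ∈ s := fun h => h ▸ hu
      simp only [List.mem_append, List.mem_cons]; tauto
    · simp only [List.cons_append, pvProj, if_neg hu, ih, List.map_cons]
      refine congrArg _ (congrArg _ (pvProj_congr _ ?_))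
      intro x; simp only [List.mem_append, List.mem_cons]; tauto

lemma pvProj_nil_of {Q : List (Int × List Int)} {s : List Int}
    (h : ∀ e ∈ Q, e.1 ∈ s) : pvProj Q s = [] := by
  induction Q with
  | nil => rfl
  | cons e rest ih =>
    obtain ⟨u, p⟩ := e
    simp only [pvProj, if_pos (h (u, p) (by simp))]
    exact ih (fun e he => h e (by simp [he]))

lemma mem_of_mem_pvProj {Q : List (Int × List Int)} {s : List Int} {e : Int × List Int}
    (h : e ∈ pvProj Q s) : e ∈ Q := by
  induction Q generalizing s with
  | nil => simpa [pvProj] using h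
  | cons f rest ih =>
    obtain ⟨u, p⟩ := f
    by_cases hu : u ∈ s
    · simp only [pvProj, if_pos hu] at h; exact List.mem_cons_of_mem _ (ih h)
    · simp only [pvProj, if_neg hu, List.mem_cons] at h
      rcases h with h | h
      · simp [h]
      · exact List.mem_cons_of_mem _ (ih h)

lemma pvProj_length_le (Q : List (Int × List Int)) (s : List Int) :
    (pvProj Q s).length ≤ Q.length := by
  induction Q generalizing s with
  | nil => simp [pvProj]
  | cons f rest ih =>
    obtain ⟨u, p⟩ := f
    by_cases hu : u ∈ s
    · simp only [pvProj, if_pos hu]; exact le_trans (ih s) (by simp)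
    · simp only [pvProj, if_neg hu, List.length_cons]
      exact Nat.succ_le_succ (ih _)

lemma pvAps_length_le (W p ns : List Int) : (pvAps W p ns).length ≤ ns.length := by
  induction ns with
  | nil => simp [pvAps]
  | cons v rest ih =>
    by_cases hv : v ∈ W
    · simp only [pvAps, if_pos hv]; exact le_trans ih (by simp)
    · simp only [pvAps, if_neg hv, List.length_cons]
      exact Nat.succ_le_succ ih

-- shape of a batch entry
lemma pvApsMem {W p ns : List Int} {e : Int × List Int} (h : e ∈ pvAps W p ns) :
    e.1 ∈ ns ∧ e.1 ∉ W ∧ e.2 = p ++ [e.1] := by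
  induction ns with
  | nil => simp [pvAps] at h
  | cons v rest ih =>
    by_cases hv : v ∈ W
    · simp only [pvAps, if_pos hv] at h
      obtain ⟨h1, h2, h3⟩ := ih h
      exact ⟨List.mem_cons_of_mem _ h1, h2, h3⟩
    · simp only [pvAps, if_neg hv, List.mem_cons] at h
      rcases h with rfl | h
      · exact ⟨by simp, hv, rfl⟩
      · obtain ⟨h1, h2, h3⟩ := ih h
        exact ⟨List.mem_cons_of_mem _ h1, h2, h3⟩

-- atoms of A's appended batch
lemma pvApsNodes (W p ns : List Int) (x : Int) :
    x ∈ (pvAps W p ns).map Prod.fst ↔ x ∈ ns ∧ x ∉ W := by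
  induction ns with
  | nil => simp [pvAps]
  | cons v rest ih =>
    by_cases hv : v ∈ W
    · simp only [pvAps, if_pos hv, ih, List.mem_cons]
      constructor
      · rintro ⟨h1, h2⟩; exact ⟨Or.inr h1, h2⟩
      · rintro ⟨h1 | h1, h2⟩
        · exact absurd (h1 ▸ hv) h2
        · exact ⟨h1, h2⟩
    · simp only [pvAps, if_neg hv, List.map_cons, List.mem_cons, ih]
      constructor
      · rintro (rfl | ⟨h1, h2⟩)
        · exact ⟨Or.inl rfl, hv⟩
        · exact ⟨Or.inr h1, h2⟩
      · rintro ⟨rfl | h1, h2⟩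
        · exact Or.inl rfl
        · exact Or.inr ⟨h1, h2⟩

-- M's inner fold = A's appended batch filtered through the projection
lemma pvFoldEq (ns p : List Int) :
    ∀ (S VB : List Int) (acc : List (Int × List Int)) (W : List Int),
    (∀ x, x ∈ S ↔ x ∈ VB) → (∀ x ∈ W, x ∈ S) →
    (ns.foldl (pvF p) (VB, acc)).2 = acc ++ pvProj (pvAps W p ns) S
    ∧ ∀ x, x ∈ (ns.foldl (pvF p) (VB, acc)).1 ↔ x ∈ VB ∨ (x ∈ ns ∧ x ∉ S) := by
  induction ns with
  | nil =>
    intro S VB acc W hSV _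
    simp [pvProj, pvAps]
  | cons v rest ih =>
    intro S VB acc W hSV hWS
    simp only [List.foldl_cons]
    by_cases hvS : v ∈ S
    · have hvB : v ∈ VB := (hSV v).mp hvS
      have hstep : pvF p (VB, acc) v = (VB, acc) := by simp [pvF, hvB]
      rw [hstep]
      obtain ⟨ih1, ih2⟩ := ih S VB acc W hSV hWS
      by_cases hvW : v ∈ W
      · rw [show pvAps W p (v :: rest) = pvAps W p rest from by simp [pvAps, hvW]]
        refine ⟨ih1, fun x => ?_⟩
        rw [ih2 x]
        simp only [List.mem_cons]
        have hxv : x = v → x ∈ S := fun h => h ▸ hvS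
        tauto
      · rw [show pvAps W p (v :: rest) = (v, p ++ [v]) :: pvAps W p rest from by
          simp [pvAps, hvW]]
        rw [show pvProj ((v, p ++ [v]) :: pvAps W p rest) S = pvProj (pvAps W p rest) S from by
          simp [pvProj, hvS]]
        refine ⟨ih1, fun x => ?_⟩
        rw [ih2 x]
        simp only [List.mem_cons]
        have hxv : x = v → x ∈ S := fun h => h ▸ hvS
        tauto
    · have hvB : v ∉ VB := fun h => hvS ((hSV v).mpr h)
      have hvW : v ∉ W := fun h => hvS (hWS v h)
      have hstep : pvF p (VB, acc) v = (VB ++ [v], acc ++ [(v, p ++ [v])]) := by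
        simp [pvF, hvB]
      rw [hstep]
      rw [show pvAps W p (v :: rest) = (v, p ++ [v]) :: pvAps W p rest from by
        simp [pvAps, hvW]]
      rw [show pvProj ((v, p ++ [v]) :: pvAps W p rest) S
          = (v, p ++ [v]) :: pvProj (pvAps W p rest) (v :: S) from by simp [pvProj, hvS]]
      have hSV' : ∀ x, x ∈ (v :: S) ↔ x ∈ VB ++ [v] := by
        intro x
        simp only [List.mem_cons, List.mem_append, List.mem_singleton]
        rw [hSV x]; tauto
      have hWS' : ∀ x ∈ W, x ∈ v :: S := fun x hx => List.mem_cons_of_mem _ (hWS x hx)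
      obtain ⟨ih1, ih2⟩ := ih (v :: S) (VB ++ [v]) (acc ++ [(v, p ++ [v])]) W hSV' hWS'
      constructor
      · rw [ih1]; simp
      · intro x
        rw [ih2 x]
        simp only [List.mem_append, List.mem_cons, List.mem_singleton]
        by_cases hxv : x = v
        · subst hxv; simp [hvS]
        · tauto

-- arithmetic facts about the measure
lemma pvM_append (c : List (Int × List Int)) (s : Int) (Q1 Q2 : List (Int × List Int)) :
    pvM c s (Q1 ++ Q2) = pvM c s Q1 + pvM c s Q2 := by
  simp [pvM]

lemma pvM_cons (c : List (Int × List Int)) (s : Int) (e : Int × List Int) (Q : List (Int × List Int)) :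
    pvM c s (e :: Q) = pvWt c s e.2 + pvM c s Q := by
  simp [pvM]

lemma pvWt_pos (c : List (Int × List Int)) (s : Int) (p : List Int) : 1 ≤ pvWt c s p :=
  Nat.one_le_pow _ _ (by omega)

lemma pvM_shape (c : List (Int × List Int)) (s : Int) (Q : List (Int × List Int)) (L : Nat)
    (h : ∀ e ∈ Q, e.2.length = L) :
    pvM c s Q = Q.length * (pvDeg c + 2) ^ ((pvNodes c s).dedup.length + 1 - L) := by
  induction Q with
  | nil => simp [pvM]
  | cons e rest ih =>
    rw [pvM_cons, ih (fun e he => h e (List.mem_cons_of_mem _ he))]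
    rw [pvWt, h e (by simp), List.length_cons, Nat.succ_mul]
    omega

lemma pvAdj_length_le (c : List (Int × List Int)) (u : Int) :
    (pvAdj c u).length ≤ pvDeg c := by
  induction c with
  | nil => simp [pvAdj, pvDeg, PySem.Dict.getD, PySem.Dict.get?]
  | cons kv rest ih =>
    obtain ⟨k, vs⟩ := kv
    simp only [pvAdj, PySem.Dict.getD_eq_get?_getD, PySem.Dict.get?_mk_cons] at *
    by_cases h : k = u
    · subst h
      simp only [BEq.rfl, if_true, Option.getD_some, pvDeg, List.map_cons, List.foldr_cons]
      exact Nat.le_max_left _ _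
    · have hbe : (k == u) = false := by simp [h]
      simp only [hbe, if_false]
      refine le_trans ih ?_
      simp only [pvDeg, List.map_cons, List.foldr_cons]
      exact Nat.le_max_right _ _

lemma pvAdj_subset (c : List (Int × List Int)) (s u : Int) :
    ∀ v ∈ pvAdj c u, v ∈ pvNodes c s := by
  intro v hv
  suffices h : v ∈ (c.map Prod.snd).flatten by simp [pvNodes, h]
  induction c with
  | nil => simp [pvAdj, PySem.Dict.getD, PySem.Dict.get?] at hv
  | cons kv rest ih =>
    obtain ⟨k, vs⟩ := kv
    simp only [pvAdj, PySem.Dict.getD_eq_get?_getD, PySem.Dict.get?_mk_cons] at hv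
    by_cases h : k = u
    · subst h
      simp only [BEq.rfl, if_true, Option.getD_some] at hv
      simp only [List.map_cons, List.flatten_cons, List.mem_append]
      exact Or.inl hv
    · have hbe : (k == u) = false := by simp [h]
      simp only [hbe, if_false] at hv
      simp only [List.map_cons, List.flatten_cons, List.mem_append]
      exact Or.inr (ih hv)

lemma pvPathLen (c : List (Int × List Int)) (s : Int) (p : List Int)
    (hnd : p.Nodup) (hsub : ∀ x ∈ p, x ∈ pvNodes c s) :
    p.length ≤ (pvNodes c s).dedup.length := by
  have h1 : p.toFinset.card = p.length := List.toFinset_card_of_nodup hnd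
  have h2 : (pvNodes c s).toFinset.card = (pvNodes c s).dedup.length := List.card_toFinset _
  have h3 : p.toFinset ⊆ (pvNodes c s).toFinset := by
    intro x hx
    exact List.mem_toFinset.mpr (hsub x (List.mem_toFinset.mp hx))
  have h4 := Finset.card_le_card h3
  omega

lemma pvNodupConcat {p : List Int} {v : Int} (h : p.Nodup) (hv : v ∉ p) :
    (p ++ [v]).Nodup := by
  simp [List.nodup_append, h]
  intro a ha rfl; exact hv ha

-- batch-measure arithmetic shared by both steps of the simulation
lemma pvStepArith (d n L M F : Nat) (hn : 1 ≤ n) (hL : L ≤ d)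
    (hM : (d + 2) ^ n + M ≤ F + 1) :
    M + L * (d + 2) ^ (n - 1) ≤ F := by
  have hX : 1 ≤ (d + 2) ^ (n - 1) := Nat.one_le_pow _ _ (by omega)
  have hpow : (d + 2) ^ n = (d + 2) * (d + 2) ^ (n - 1) := by
    conv_lhs => rw [show n = (n - 1) + 1 by omega]
    rw [pow_succ]; ring
  have h1 : L * (d + 2) ^ (n - 1) ≤ d * (d + 2) ^ (n - 1) :=
    Nat.mul_le_mul_right _ hL
  have h2 : d * (d + 2) ^ (n - 1) + 2 ≤ (d + 2) * (d + 2) ^ (n - 1) := by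
    nlinarith [hX]
  omega

-- main simulation lemma: A's run from (QA, VA) computes what M's run computes from
-- (pvProj QA VA, VB), provided both fuels dominate the respective measures.
lemma pvMain (c : List (Int × List Int)) (s t : Int) :
    ∀ fa : Nat, ∀ (QA : List (Int × List Int)) (VA : List Int)
      (QB : List (Int × List Int)) (VB : List Int) (fb : Nat),
    pvInv c s t QA VA →
    QB = pvProj QA VA →
    (∀ x, x ∈ VB ↔ x ∈ VA ∨ x ∈ QA.map Prod.fst) →
    pvM c s QA ≤ fa → pvM c s QB ≤ fb →
    pvLoopA c t fa QA VA = pvLoopM c t fb QB VB := by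
  intro fa
  induction fa using Nat.strong_induction_on with
  | h fa IH =>
  intro QA VA QB VB fb hInv hQB hVB hMA hMB
  obtain ⟨hT, hE, hI2⟩ := hInv
  rcases QA with _ | ⟨⟨u, p⟩, rest⟩
  · have hQBnil : QB = [] := by rw [hQB]; rfl
    subst hQBnil
    rcases fa with _ | fa <;> rcases fb with _ | fb <;> simp [pvLoopA, pvLoopM]
  · -- facts about the head entry
    obtain ⟨hp_ne, hp_nd, hp_last, hp_sub, hp_drop⟩ := hE (u, p) (by simp)
    dsimp only at hp_ne hp_nd hp_last hp_sub hp_drop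
    obtain ⟨q, hq⟩ := List.getLast?_eq_some_iff.mp hp_last
    subst hq
    have hq_drop : ∀ x ∈ q, x ∈ VA := by
      intro x hx; exact hp_drop x (by simpa using hx)
    have hmemp : ∀ x ∈ q ++ [u], x ∈ VA ∨ x = u := by
      intro x hx
      rcases List.mem_append.mp hx with hx | hx
      · exact Or.inl (hq_drop x hx)
      · exact Or.inr (by simpa using hx)
    have hplen : (q ++ [u]).length ≤ (pvNodes c s).dedup.length :=
      pvPathLen c s _ hp_nd hp_sub
    have hwt : pvWt c s (q ++ [u]) =
        (pvDeg c + 2) ^ ((pvNodes c s).dedup.length + 1 - (q ++ [u]).length) := rfl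
    have hwt_pos := pvWt_pos c s (q ++ [u])
    have hMAc : pvWt c s (q ++ [u]) + pvM c s rest ≤ fa := by
      rw [pvM_cons] at hMA; exact hMA
    obtain ⟨fa', rfl⟩ : ∃ fa', fa = fa' + 1 := ⟨fa - 1, by omega⟩
    by_cases hut : u = t
    · -- target dequeued: both return (len(path)-1, path)
      have huVA : u ∉ VA := fun h => hT (hut ▸ h)
      have hQBc : QB = (u, q ++ [u]) :: pvProj rest (u :: VA) := by
        rw [hQB]; simp [pvProj, huVA]
      have hMBc : pvWt c s (q ++ [u]) + pvM c s (pvProj rest (u :: VA)) ≤ fb := by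
        rw [hQBc, pvM_cons] at hMB; exact hMB
      obtain ⟨fb', rfl⟩ : ∃ fb', fb = fb' + 1 := ⟨fb - 1, by omega⟩
      rw [hQBc]
      simp [pvLoopA, pvLoopM, if_pos hut]
    · by_cases huv : u ∈ VA
      · -- duplicate entry of an already-visited atom: A churns, M's state is unchanged
        have hadd : PySem.Set.add VA u = VA := PySem.Set.add_of_mem huv
        simp only [pvLoopA, if_neg hut, hadd, pvApsEq]
        set aps := pvAps VA (q ++ [u]) (pvAdj c u) with haps
        -- every batch atom already has an earlier queue entry
        have hbatch : ∀ e ∈ aps, e.1 ∈ rest.map Prod.fst ∧ e.1 ∉ VA ∧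
            e.1 ∈ pvAdj c u ∧ e.2 = (q ++ [u]) ++ [e.1] := by
          intro e he
          obtain ⟨h1, h2, h3⟩ := pvApsMem he
          rcases hI2 u huv e.1 h1 with h | h
          · exact absurd h h2
          · rcases (by simpa using h : e.1 = u ∨ e.1 ∈ rest.map Prod.fst) with heu | h
            · exact absurd (heu ▸ huv) h2
            · exact ⟨h, h2, h1, h3⟩
        refine IH fa' (by omega) (rest ++ aps) VA QB VB fb ⟨hT, ?_, ?_⟩ ?_ ?_ ?_ hMB
        · -- entry invariant
          intro e he
          rcases List.mem_append.mp he with he | he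
          · exact hE e (by simp [he])
          · obtain ⟨h1, h2, h3, h4⟩ := hbatch e he
            obtain ⟨v, pe⟩ := e
            dsimp only at h1 h2 h3 h4 ⊢
            subst h4
            refine ⟨by simp, ?_, by simp, ?_, ?_⟩
            · refine pvNodupConcat hp_nd (fun hv => ?_)
              rcases hmemp v hv with h | rfl
              · exact h2 h
              · exact h2 huv
            · intro x hx
              rcases List.mem_append.mp hx with hx | hx
              · exact hp_sub x hx
              · have hxv : x = v := by simpa using hx
                exact hxv ▸ pvAdj_subset c s u v h3
            · intro x hx
              rw [List.dropLast_concat] at hx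
              rcases hmemp x hx with h | rfl
              · exact h
              · exact huv
        · -- reachability witnesses survive
          intro w hw v' hv'
          rcases hI2 w hw v' hv' with h | h
          · exact Or.inl h
          · rcases (by simpa using h : v' = u ∨ v' ∈ rest.map Prod.fst) with rfl | h
            · exact Or.inl huv
            · exact Or.inr (by simp [h])
        · -- projection unchanged: the whole batch projects away
          rw [hQB, pvProj_append]
          have h1 : pvProj ((u, q ++ [u]) :: rest) VA = pvProj rest VA := by
            simp [pvProj, huv]
          have h2 : pvProj aps (rest.map Prod.fst ++ VA) = [] := by
            refine pvProj_nil_of (fun e he => ?_)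
            exact List.mem_append.mpr (Or.inl (hbatch e he).1)
          rw [h1, h2, List.append_nil]
        · -- visited-or-queued set unchanged
          intro x
          rw [hVB x]
          simp only [List.map_append, List.mem_append, List.map_cons, List.mem_cons]
          constructor
          · rintro (h | h | h)
            · exact Or.inl h
            · exact Or.inl (h ▸ huv)
            · exact Or.inr (Or.inl h)
          · rintro (h | h | h)
            · exact Or.inl h
            · exact Or.inr (Or.inr h)
            · obtain ⟨e, he, rfl⟩ := List.mem_map.mp h
              exact Or.inr (Or.inr (hbatch e he).1)
        · -- A-side measure decreases
          rw [pvM_append]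
          have hshape : pvM c s aps =
              aps.length * (pvDeg c + 2) ^
                ((pvNodes c s).dedup.length + 1 - ((q ++ [u]).length + 1)) := by
            refine pvM_shape c s aps _ (fun e he => ?_)
            rw [(hbatch e he).2.2.2]; simp
          have hlen : aps.length ≤ pvDeg c :=
            le_trans (pvAps_length_le _ _ _) (pvAdj_length_le c u)
          rw [hshape]
          have hsub : (pvNodes c s).dedup.length + 1 - ((q ++ [u]).length + 1) =
              ((pvNodes c s).dedup.length + 1 - (q ++ [u]).length) - 1 := by omega
          rw [hsub]
          exact pvStepArith (pvDeg c) ((pvNodes c s).dedup.length + 1 - (q ++ [u]).length) aps.length (pvM c s rest) fa'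
            (by omega) hlen (by rw [← hwt]; exact hMAc)
      · -- first dequeue of an unvisited atom: both sides step in lockstep
        have hadd : PySem.Set.add VA u = VA ++ [u] := PySem.Set.add_of_not_mem huv
        have hQBc : QB = (u, q ++ [u]) :: pvProj rest (u :: VA) := by
          rw [hQB]; simp [pvProj, huv]
        have hMBc : pvWt c s (q ++ [u]) + pvM c s (pvProj rest (u :: VA)) ≤ fb := by
          rw [hQBc, pvM_cons] at hMB; exact hMB
        obtain ⟨fb', rfl⟩ : ∃ fb', fb = fb' + 1 := ⟨fb - 1, by omega⟩
        rw [hQBc]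
        simp only [pvLoopA, pvLoopM, if_neg hut, hadd, pvApsEq, pvFoldRw]
        set aps := pvAps (VA ++ [u]) (q ++ [u]) (pvAdj c u) with haps
        set S := rest.map Prod.fst ++ (VA ++ [u]) with hS
        have hSV : ∀ x, x ∈ S ↔ x ∈ VB := by
          intro x
          rw [hVB x]
          simp only [hS, List.mem_append, List.mem_singleton, List.map_cons, List.mem_cons]
          tauto
        have hWS : ∀ x ∈ VA ++ [u], x ∈ S := by
          intro x hx; exact List.mem_append.mpr (Or.inr hx)
        have hFold := pvFoldEq (pvAdj c u) (q ++ [u]) S VB [] (VA ++ [u]) hSV hWS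
        rw [hFold.1, List.nil_append]
        have hbatch : ∀ e ∈ aps, e.1 ∈ pvAdj c u ∧ e.1 ∉ VA ++ [u] ∧
            e.2 = (q ++ [u]) ++ [e.1] := fun e he => pvApsMem he
        refine IH fa' (by omega) (rest ++ aps) (VA ++ [u])
          (pvProj rest (u :: VA) ++ pvProj aps S)
          ((pvAdj c u).foldl (pvF (q ++ [u])) (VB, [])).1 fb' ⟨?_, ?_, ?_⟩ ?_ ?_ ?_ ?_
        · -- target still unvisited
          intro h
          rcases List.mem_append.mp h with h | h
          · exact hT h
          · have h' : t = u := by simpa using h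
            exact hut h'.symm
        · -- entry invariant
          intro e he
          rcases List.mem_append.mp he with he | he
          · obtain ⟨g1, g2, g3, g4, g5⟩ := hE e (by simp [he])
            exact ⟨g1, g2, g3, g4, fun x hx => List.mem_append.mpr (Or.inl (g5 x hx))⟩
          · obtain ⟨h1, h2, h3⟩ := hbatch e he
            obtain ⟨v, pe⟩ := e
            dsimp only at h1 h2 h3 ⊢
            subst h3
            refine ⟨by simp, ?_, by simp, ?_, ?_⟩
            · refine pvNodupConcat hp_nd (fun hv => ?_)
              rcases hmemp v hv with h | rfl
              · exact h2 (List.mem_append.mpr (Or.inl h))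
              · exact h2 (List.mem_append.mpr (Or.inr (by simp)))
            · intro x hx
              rcases List.mem_append.mp hx with hx | hx
              · exact hp_sub x hx
              · have hxv : x = v := by simpa using hx
                exact hxv ▸ pvAdj_subset c s u v h1
            · intro x hx
              rw [List.dropLast_concat] at hx
              rcases hmemp x hx with h | rfl
              · exact List.mem_append.mpr (Or.inl h)
              · exact List.mem_append.mpr (Or.inr (by simp))
        · -- reachability witnesses
          intro w hw v' hv'
          rcases List.mem_append.mp hw with hw | hw
          · rcases hI2 w hw v' hv' with h | h
            · exact Or.inl (List.mem_append.mpr (Or.inl h))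
            · rcases (by simpa using h : v' = u ∨ v' ∈ rest.map Prod.fst) with rfl | h
              · exact Or.inl (List.mem_append.mpr (Or.inr (by simp)))
              · exact Or.inr (by simp [h])
          · have hwu : w = u := by simpa using hw
            subst hwu
            by_cases hv'' : v' ∈ VA ++ [w]
            · exact Or.inl hv''
            · refine Or.inr ?_
              have hmm : v' ∈ aps.map Prod.fst :=
                (pvApsNodes (VA ++ [w]) (q ++ [w]) (pvAdj c w) v').mpr ⟨hv', hv''⟩
              simp only [List.map_append, List.mem_append]
              exact Or.inr hmm
        · -- queues related by projection
          rw [pvProj_append]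
          refine congrArg₂ _ (pvProj_congr rest (fun x => ?_)) rfl
          simp only [List.mem_append, List.mem_singleton, List.mem_cons]; tauto
        · -- visited sets related
          intro x
          rw [hFold.2 x, hVB x]
          have haN : x ∈ aps.map Prod.fst ↔ x ∈ pvAdj c u ∧ x ∉ VA ++ [u] :=
            pvApsNodes (VA ++ [u]) (q ++ [u]) (pvAdj c u) x
          simp only [List.map_append, List.mem_append, List.mem_singleton,
            List.map_cons, List.mem_cons, hS] at haN ⊢
          rw [haN]
          tauto
        · -- A-side measure
          rw [pvM_append]
          have hshape : pvM c s aps =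
              aps.length * (pvDeg c + 2) ^
                ((pvNodes c s).dedup.length + 1 - ((q ++ [u]).length + 1)) := by
            refine pvM_shape c s aps _ (fun e he => ?_)
            rw [(hbatch e he).2.2]; simp
          have hlen : aps.length ≤ pvDeg c :=
            le_trans (pvAps_length_le _ _ _) (pvAdj_length_le c u)
          rw [hshape]
          have hsub : (pvNodes c s).dedup.length + 1 - ((q ++ [u]).length + 1) =
              ((pvNodes c s).dedup.length + 1 - (q ++ [u]).length) - 1 := by omega
          rw [hsub]
          exact pvStepArith (pvDeg c) ((pvNodes c s).dedup.length + 1 - (q ++ [u]).length) aps.length (pvM c s rest) fa'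
            (by omega) hlen (by rw [← hwt]; exact hMAc)
        · -- M-side measure
          rw [pvM_append]
          have hshape : pvM c s (pvProj aps S) =
              (pvProj aps S).length * (pvDeg c + 2) ^
                ((pvNodes c s).dedup.length + 1 - ((q ++ [u]).length + 1)) := by
            refine pvM_shape c s _ _ (fun e he => ?_)
            rw [(hbatch e (mem_of_mem_pvProj he)).2.2]; simp
          have hlen : (pvProj aps S).length ≤ pvDeg c :=
            le_trans (pvProj_length_le _ _)
              (le_trans (pvAps_length_le _ _ _) (pvAdj_length_le c u))
          rw [hshape]
          have hsub : (pvNodes c s).dedup.length + 1 - ((q ++ [u]).length + 1) =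
              ((pvNodes c s).dedup.length + 1 - (q ++ [u]).length) - 1 := by omega
          rw [hsub]
          exact pvStepArith (pvDeg c) ((pvNodes c s).dedup.length + 1 - (q ++ [u]).length) (pvProj aps S).length
            (pvM c s (pvProj rest (u :: VA))) fb'
            (by omega) hlen (by rw [← hwt]; exact hMBc)

-- parent-map chains: 'pvIsChain parent x l' says l is the root-to-x path the parent map
-- encodes (the root points to itself).
inductive pvIsChain (parent : PySem.Dict Int Int) : Int → List Int → Prop
  | root (x : Int) (h : parent.get? x = some x) : pvIsChain parent x [x]
  | step (x y : Int) (l : List Int) (h : parent.get? x = some y) (hne : y ≠ x)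
      (hc : pvIsChain parent y l) : pvIsChain parent x (l ++ [x])

lemma pvChain_mem_keys {parent : PySem.Dict Int Int} {x : Int} {l : List Int}
    (h : pvIsChain parent x l) : ∀ a ∈ l, (parent.get? a).isSome := by
  induction h with
  | root x hx =>
    intro a ha
    have hax : a = x := by simpa using ha
    simp [hax, hx]
  | step x y l hx hne hc ih =>
    intro a ha
    rcases List.mem_append.mp ha with ha | ha
    · exact ih a ha
    · have : a = x := by simpa using ha
      simp [this, hx]

lemma pvChain_last {parent : PySem.Dict Int Int} {x : Int} {l : List Int}
    (h : pvIsChain parent x l) : x ∈ l := by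
  induction h with
  | root x hx => simp
  | step x y l hx hne hc ih => simp

lemma pvChain_of_agree {parent d : PySem.Dict Int Int} {x : Int} {l : List Int}
    (hag : ∀ k, (parent.get? k).isSome → d.get? k = parent.get? k)
    (h : pvIsChain parent x l) : pvIsChain d x l := by
  induction h with
  | root x hx => exact pvIsChain.root x (by rw [hag x (by simp [hx])]; exact hx)
  | step x y l hx hne hc ih =>
    exact pvIsChain.step x y l (by rw [hag x (by simp [hx])]; exact hx) hne ih

-- B's reconstruction loop computes the chain list (fuel and acc generalized)
lemma pvBuild_chain {parent : PySem.Dict Int Int} {x : Int} {l : List Int}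
    (h : pvIsChain parent x l) :
    ∀ (fuel : Nat), l.length ≤ fuel → ∀ acc : List Int,
      pvBuild parent fuel x acc = l ++ acc.reverse := by
  induction h with
  | root x hx =>
    intro fuel hf acc
    have hf1 : 1 ≤ fuel := by simpa using hf
    obtain ⟨f, rfl⟩ : ∃ f, fuel = f + 1 := ⟨fuel - 1, by omega⟩
    simp [pvBuild, hx]
  | step x y l hx hne hc ih =>
    intro fuel hf acc
    have hf1 : l.length + 1 ≤ fuel := by simpa using hf
    obtain ⟨f, rfl⟩ : ∃ f, fuel = f + 1 := ⟨fuel - 1, by omega⟩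
    have hflen : l.length ≤ f := by omega
    simp only [pvBuild, hx]
    rw [if_neg hne, ih f hflen (acc ++ [x])]
    simp

-- a Nodup list contained in another list is no longer than it
lemma pvLenLe (p ks : List Int) (hnd : p.Nodup) (hsub : ∀ x ∈ p, x ∈ ks) :
    p.length ≤ ks.length := by
  have h1 : p.toFinset.card = p.length := List.toFinset_card_of_nodup hnd
  have h3 : p.toFinset ⊆ ks.toFinset := by
    intro x hx
    exact List.mem_toFinset.mpr (hsub x (List.mem_toFinset.mp hx))
  have h4 := Finset.card_le_card h3
  have h5 := ks.toFinset_card_le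
  omega

-- joint step through the two inner folds: M's (visited set, path entries) against
-- B's (parent map, discovered atoms)
lemma pvFoldBC (u : Int) (p : List Int) :
    ∀ (ns : List Int) (VB : List Int) (parent : PySem.Dict Int Int) (accC : List Int),
    (∀ x, x ∈ VB ↔ (parent.get? x).isSome) →
    parent.keys.Nodup →
    (ns.foldl (pvF p) (VB, accC.map (fun v => (v, p ++ [v])))).2
        = ((ns.foldl (fun (st : PySem.Dict Int Int × List Int) v =>
            if st.1.contains v then st else (st.1.insert v u, st.2 ++ [v])) (parent, accC)).2).map
            (fun v => (v, p ++ [v])) ∧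
    (∀ x, x ∈ (ns.foldl (pvF p) (VB, accC.map (fun v => (v, p ++ [v])))).1 ↔
        (((ns.foldl (fun (st : PySem.Dict Int Int × List Int) v =>
            if st.1.contains v then st else (st.1.insert v u, st.2 ++ [v])) (parent, accC)).1).get? x).isSome) ∧
    ((ns.foldl (fun (st : PySem.Dict Int Int × List Int) v =>
        if st.1.contains v then st else (st.1.insert v u, st.2 ++ [v])) (parent, accC)).1).keys.Nodup ∧
    (∀ k, (parent.get? k).isSome →
        ((ns.foldl (fun (st : PySem.Dict Int Int × List Int) v =>
            if st.1.contains v then st else (st.1.insert v u, st.2 ++ [v])) (parent, accC)).1).get? k = parent.get? k) ∧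
    (∀ v', v' ∈ (ns.foldl (fun (st : PySem.Dict Int Int × List Int) v =>
        if st.1.contains v then st else (st.1.insert v u, st.2 ++ [v])) (parent, accC)).2 →
        v' ∈ accC ∨
        (((ns.foldl (fun (st : PySem.Dict Int Int × List Int) v =>
            if st.1.contains v then st else (st.1.insert v u, st.2 ++ [v])) (parent, accC)).1).get? v' = some u ∧ v' ∉ VB)) := by
  intro ns
  induction ns with
  | nil =>
    intro VB parent accC hmem hnd
    exact ⟨rfl, hmem, hnd, fun k _ => rfl, fun v' hv' => Or.inl hv'⟩
  | cons v rest ih =>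
    intro VB parent accC hmem hnd
    simp only [List.foldl_cons]
    by_cases hv : v ∈ VB
    · have hvs : (parent.get? v).isSome := (hmem v).mp hv
      have hcont : parent.contains v = true := by
        rw [PySem.Dict.contains_eq_isSome_get?]; exact hvs
      have hstepB : pvF p (VB, accC.map (fun v => (v, p ++ [v]))) v
          = (VB, accC.map (fun v => (v, p ++ [v]))) := by simp [pvF, hv]
      rw [hstepB, if_pos hcont]
      exact ih VB parent accC hmem hnd
    · have hvn : parent.get? v = none := by
        rcases h : parent.get? v with _ | w
        · rfl
        · exact absurd ((hmem v).mpr (by simp [h])) hv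
      have hcont : parent.contains v = false := by
        rw [PySem.Dict.contains_eq_isSome_get?, hvn]; rfl
      have hstepB : pvF p (VB, accC.map (fun v => (v, p ++ [v]))) v
          = (VB ++ [v], (accC ++ [v]).map (fun v => (v, p ++ [v]))) := by
        simp [pvF, hv]
      rw [hstepB, if_neg (by simp [hcont])]
      have hmem' : ∀ x, x ∈ VB ++ [v] ↔ (((parent.insert v u).get? x)).isSome := by
        intro x
        rw [PySem.Dict.get?_insert]
        by_cases hxv : x = v
        · simp [hxv]
        · simp only [if_neg hxv, List.mem_append, List.mem_singleton]
          rw [hmem x]; simp [hxv]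
      have hnd' : (parent.insert v u).keys.Nodup := PySem.Dict.nodup_keys_insert parent v u hnd
      obtain ⟨ih1, ih2, ih3, ih4, ih5⟩ := ih (VB ++ [v]) (parent.insert v u) (accC ++ [v]) hmem' hnd'
      refine ⟨ih1, ih2, ih3, ?_, ?_⟩
      · intro k hk
        have hkv : k ≠ v := fun h => by rw [h, hvn] at hk; simp at hk
        have h1 : (parent.insert v u).get? k = parent.get? k :=
          PySem.Dict.get?_insert_of_ne parent u hkv
        rw [ih4 k (by rw [h1]; exact hk), h1]
      · intro v' hv'
        rcases ih5 v' hv' with h | ⟨h1, h2⟩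
        · rcases List.mem_append.mp h with h | h
          · exact Or.inl h
          · have hveq : v' = v := by simpa using h
            subst hveq
            refine Or.inr ⟨?_, hv⟩
            have hg : (parent.insert v' u).get? v' = some u := PySem.Dict.get?_insert_self parent v' u
            rw [ih4 v' (by rw [hg]; simp), hg]
        · exact Or.inr ⟨h1, fun hx => h2 (List.mem_append.mpr (Or.inl hx))⟩

-- lockstep simulation: M's path-carrying queue against B's atom queue + parent map
lemma pvBC (c : List (Int × List Int)) (t : Int) :
    ∀ (fuel : Nat) (QB : List (Int × List Int)) (VB : List Int) (parent : PySem.Dict Int Int),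
    (∀ x, x ∈ VB ↔ (parent.get? x).isSome) →
    parent.keys.Nodup →
    (∀ e ∈ QB, pvIsChain parent e.1 e.2 ∧ e.2.Nodup ∧ ∀ x ∈ e.2, x ∈ VB) →
    pvLoopM c t fuel QB VB = pvLoopB c t fuel (QB.map Prod.fst) parent := by
  intro fuel
  induction fuel with
  | zero =>
    intro QB VB parent _ _ _
    rcases QB with _ | ⟨⟨u, p⟩, rest⟩ <;> simp [pvLoopM, pvLoopB]
  | succ f ih =>
    intro QB VB parent hmem hnd hQ
    rcases QB with _ | ⟨⟨u, p⟩, rest⟩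
    · simp [pvLoopM, pvLoopB]
    obtain ⟨hchain, hpnd, hpsub⟩ := hQ (u, p) (by simp)
    dsimp only at hchain hpnd hpsub
    simp only [List.map_cons, pvLoopM, pvLoopB]
    by_cases hut : u = t
    · -- target: B rebuilds exactly the stored path
      have hkeys : ∀ x ∈ p, x ∈ parent.keys := by
        intro x hx
        have := pvChain_mem_keys hchain x hx
        rw [← PySem.Dict.contains_eq_isSome_get?] at this
        exact (PySem.Dict.contains_iff_mem_keys parent x).mp this
      have hlen : p.length ≤ parent.size := by
        have h1 : p.length ≤ parent.keys.length := pvLenLe p parent.keys hpnd hkeys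
        have h2 : parent.keys.length = parent.size := by
          simp [PySem.Dict.keys, PySem.Dict.size]
        omega
      have hbuild : pvBuild parent parent.size u [] = p := by
        rw [pvBuild_chain hchain parent.size hlen []]; simp
      simp [if_pos hut, hbuild]
    · simp only [if_neg hut, pvFoldRw]
      have hF := pvFoldBC u p (pvAdj c u) VB parent [] hmem hnd
      simp only [List.map_nil] at hF
      obtain ⟨hF1, hF2, hF3, hF4, hF5⟩ := hF
      rw [hF1]
      have hmap : (rest ++ ((pvAdj c u).foldl (fun (st : PySem.Dict Int Int × List Int) v =>
          if st.1.contains v then st else (st.1.insert v u, st.2 ++ [v])) (parent, [])).2.map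
          (fun v => (v, p ++ [v]))).map Prod.fst
          = rest.map Prod.fst ++ ((pvAdj c u).foldl (fun (st : PySem.Dict Int Int × List Int) v =>
          if st.1.contains v then st else (st.1.insert v u, st.2 ++ [v])) (parent, [])).2 := by
        have hid : (Prod.fst ∘ fun v : Int => (v, p ++ [v])) = id := rfl
        simp [List.map_map, hid]
      rw [← hmap]
      refine ih _ _ _ hF2 hF3 ?_
      intro e he
      rcases List.mem_append.mp he with he | he
      · obtain ⟨g1, g2, g3⟩ := hQ e (by simp [he])
        refine ⟨pvChain_of_agree hF4 g1, g2, fun x hx => ?_⟩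
        have hxV : x ∈ VB := g3 x hx
        have := (hmem x).mp hxV
        exact (hF2 x).mpr (by rw [hF4 x this]; exact this)
      · obtain ⟨v', hv', rfl⟩ := List.mem_map.mp he
        rcases hF5 v' hv' with h | ⟨h1, h2⟩
        · simp at h
        · have huv : u ≠ v' := fun h => h2 (h ▸ hpsub u (pvChain_last hchain))
          refine ⟨pvIsChain.step v' u p h1 huv (pvChain_of_agree hF4 hchain), ?_, ?_⟩
          · exact pvNodupConcat hpnd (fun hx => h2 (hpsub v' hx))
          · intro x hx
            rcases List.mem_append.mp hx with hx | hx
            · have hxV : VB.Mem x := hpsub x hx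
              have := (hmem x).mp hxV
              exact (hF2 x).mpr (by rw [hF4 x this]; exact this)
            · have hxe : x = v' := by simpa using hx
              exact (hF2 x).mpr (by rw [hxe, h1]; simp)

-- ===== VERDICT (by name: the statement is the Claim_ definition above) =====
theorem find_bond_path_with_distance_spec : Claim_equal_find_bond_path_with_distance := by
  unfold Claim_equal_find_bond_path_with_distance
  intro c s t _hDom
  unfold Spec_find_bond_path_with_distance
  unfold find_bond_path_with_distance find_bond_path_with_distance_alt
  have hM0 : pvM c s [(s, [s])] ≤ pvFuel c s := by
    have h1 : pvM c s [(s, [s])] = (pvDeg c + 2) ^ ((pvNodes c s).dedup.length + 1 - 1) := by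
      simp [pvM, pvWt]
    rw [h1, pvFuel]
    exact Nat.pow_le_pow_right (by omega) (by omega)
  have hAM : pvLoopA c t (pvFuel c s) [(s, [s])] PySem.Set.empty
      = pvLoopM c t (pvFuel c s) [(s, [s])] [s] := by
    refine pvMain c s t (pvFuel c s) [(s, [s])] [] [(s, [s])] [s] (pvFuel c s)
      ⟨by simp, ?_, by simp⟩ ?_ ?_ hM0 hM0
    · intro e he
      have he' : e = (s, [s]) := by simpa using he
      subst he'
      refine ⟨by simp, by simp, by simp, ?_, by simp⟩
      intro x hx
      have hxs : x = s := by simpa using hx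
      simp [hxs, pvNodes]
    · simp [pvProj]
    · intro x; simp
  have hget : (PySem.Dict.mk [(s, s)]).get? s = some s := by
    simp [PySem.Dict.get?_mk_cons]
  have hMB : pvLoopM c t (pvFuel c s) [(s, [s])] [s]
      = pvLoopB c t (pvFuel c s) [s] (PySem.Dict.mk [(s, s)]) := by
    have h := pvBC c t (pvFuel c s) [(s, [s])] [s] (PySem.Dict.mk [(s, s)]) ?_ ?_ ?_
    · simpa using h
    · intro x
      constructor
      · intro hx
        have hxs : x = s := by simpa using hx
        simp [hxs, hget]
      · intro hx
        by_cases hxs : x = s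
        · simp [hxs]
        · exfalso
          have : (PySem.Dict.mk [(s, s)]).get? x = none := by
            simp [PySem.Dict.get?_mk_cons, Ne.symm hxs, PySem.Dict.get?]
          rw [this] at hx; simp at hx
    · simp [PySem.Dict.keys_mk]
    · intro e he
      have he' : e = (s, [s]) := by simpa using he
      subst he'
      exact ⟨pvIsChain.root s hget, by simp, by simp⟩
  rw [hAM, hMB]
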